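-- pv_equiv track=rewrite | github.com/adrianpawlas/scraper-asos | extract_categories.py | categorize_by_section
-- ===== SOURCE A (Python) =====
-- from collections import defaultdict
--
-- def categorize_by_section(categories):
--     """Group categories by main sections (Men, Women, Sale, etc.)"""
--
--     sections = defaultdict(list)
--
--     for cat in categories:
--         url = cat['web_url'].lower()
--
--         if '/men/' in url:
--             sections['men'].append(cat)
--         elif '/women/' in url:
--             sections['women'].append(cat)
--         elif '/sale/' in url:
--             sections['sale'].append(cat)
--         elif '/new-in/' in url or 'new' in url.lower():
--             sections['new_in'].append(cat)
--         elif '/outlet/' in url: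
--             sections['outlet'].append(cat)
--         elif '/marketplace/' in url:
--             sections['marketplace'].append(cat)
--         else:
--             sections['other'].append(cat)
--
--     return dict(sections)
-- ===== SOURCE B (Python) =====
-- def categorize_by_section(categories):
--     """Group categories by main sections (Men, Women, Sale, etc.)"""
--     rules = [('/men/', 'men'), ('/women/', 'women'), ('/sale/', 'sale'),
--              ('new', 'new_in'), ('/outlet/', 'outlet'), ('/marketplace/', 'marketplace')]
--
--     def label(cat):
--         url = cat['web_url'].lower()
--         return next((lab for sub, lab in rules if sub in url), 'other')
--
--     labels = [label(cat) for cat in categories]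
--     pairs = list(zip(categories, labels))
--     return {lab: [cat for cat, l in pairs if l == lab]
--             for lab in dict.fromkeys(labels)}
-- ===== Notes on version B (the rewrite author's own statement) =====
-- stated objective: alternative
-- what changed: Replaces A's single pass that mutates a defaultdict through an if/elif chain by staged passes with no mutable accumulator: first map every category to its label via an ordered rules table, then dedup the labels for key order, then build the result as a dict comprehension that filters the (category,label) pairs per key.
import Mathlib
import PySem

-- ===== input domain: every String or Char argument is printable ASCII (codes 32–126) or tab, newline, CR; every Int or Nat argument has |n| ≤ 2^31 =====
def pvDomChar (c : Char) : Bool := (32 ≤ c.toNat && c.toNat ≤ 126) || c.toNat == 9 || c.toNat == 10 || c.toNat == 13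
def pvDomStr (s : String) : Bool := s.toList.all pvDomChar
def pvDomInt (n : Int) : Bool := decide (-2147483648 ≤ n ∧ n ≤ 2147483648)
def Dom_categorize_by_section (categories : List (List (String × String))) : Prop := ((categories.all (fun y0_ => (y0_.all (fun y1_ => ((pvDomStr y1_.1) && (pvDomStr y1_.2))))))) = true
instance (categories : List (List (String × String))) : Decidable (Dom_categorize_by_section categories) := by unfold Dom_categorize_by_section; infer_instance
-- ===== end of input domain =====

-- B does the same grouping with staged passes and no mutable accumulator: label every category via
-- an ordered rules table, dedup the labels for key order, then filter the (category,label) pairs per key.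

-- ===== PORT A =====
def categorize_by_section (categories : List (List (String × String))) : List (String × List (List (String × String))) :=
  let sections : PySem.Dict String (List (List (String × String))) :=
    categories.foldl (fun sections cat =>
      match (PySem.Dict.mk cat).get? "web_url" with
      | none => sections   -- Python raises KeyError here; excluded by Pre_
      | some wu =>
        let url := PySem.Str.lower wu
        if PySem.Str.isIn "/men/" url then
          sections.insert "men" (sections.getD "men" [] ++ [cat])
        else if PySem.Str.isIn "/women/" url then
          sections.insert "women" (sections.getD "women" [] ++ [cat])
        else if PySem.Str.isIn "/sale/" url then
          sections.insert "sale" (sections.getD "sale" [] ++ [cat])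
        else if PySem.Str.isIn "/new-in/" url || PySem.Str.isIn "new" (PySem.Str.lower url) then
          sections.insert "new_in" (sections.getD "new_in" [] ++ [cat])
        else if PySem.Str.isIn "/outlet/" url then
          sections.insert "outlet" (sections.getD "outlet" [] ++ [cat])
        else if PySem.Str.isIn "/marketplace/" url then
          sections.insert "marketplace" (sections.getD "marketplace" [] ++ [cat])
        else
          sections.insert "other" (sections.getD "other" [] ++ [cat])) PySem.Dict.empty
  sections.items

-- ===== PORT B =====
def pvRules : List (String × String) :=
  [("/men/", "men"), ("/women/", "women"), ("/sale/", "sale"),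
   ("new", "new_in"), ("/outlet/", "outlet"), ("/marketplace/", "marketplace")]

-- Source B's local 'label': next((lab for sub, lab in rules if sub in url), 'other')
def pvLabel (cat : List (String × String)) : String :=
  match (PySem.Dict.mk cat).get? "web_url" with
  | none => "other"   -- Python raises KeyError here; excluded by Pre_
  | some wu =>
    let url := PySem.Str.lower wu
    ((pvRules.find? (fun r => PySem.Str.isIn r.1 url)).map Prod.snd).getD "other"

def categorize_by_section_alt (categories : List (List (String × String))) : List (String × List (List (String × String))) :=
  let labels := categories.map pvLabel
  let pairs := categories.zip labels
  (PySem.List.dedup labels).map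
    (fun lab => (lab, (pairs.filter (fun p => p.2 == lab)).map Prod.fst))

-- ===== PRECONDITION & SPEC =====
-- Pre_ excludes exactly the inputs where Python A raises KeyError: a category without a "web_url" key.
def Pre_categorize_by_section (categories : List (List (String × String))) : Prop :=
  ∀ cat ∈ categories, (PySem.Dict.mk cat).contains "web_url" = true
instance (categories : List (List (String × String))) : Decidable (Pre_categorize_by_section categories) := by unfold Pre_categorize_by_section; infer_instance

def pvWitness_categorize_by_section : (List (List (String × String))) :=
  [[("web_url", "/men/shoes"), ("id", "1")], [("web_url", "/kids/NEW-in/x")]]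

def Spec_categorize_by_section (categories : List (List (String × String))) (out : List (String × List (List (String × String)))) : Prop := out = categorize_by_section_alt categories
instance (categories : List (List (String × String))) (out : List (String × List (List (String × String)))) : Decidable (Spec_categorize_by_section categories out) := by unfold Spec_categorize_by_section; infer_instance

-- ===== CLAIM =====
def Claim_equal_categorize_by_section : Prop := ∀ (categories : List (List (String × String))), Dom_categorize_by_section categories → Pre_categorize_by_section categories → Spec_categorize_by_section categories (categorize_by_section categories)

-- ===== LEMMAS AND PROOFS =====

theorem lowerChar_idem (c : Char) : PySem.Chars.lowerChar (PySem.Chars.lowerChar c) = PySem.Chars.lowerChar c := by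
  unfold PySem.Chars.lowerChar PySem.Chars.isupper
  split_ifs with h1 h2
  · exfalso
    simp only [Bool.and_eq_true, decide_eq_true_eq, Char.le_def, UInt32.le_iff_toNat_le] at h1 h2
    have hA : ('A' : Char).val.toNat = 65 := rfl
    have hZ : ('Z' : Char).val.toNat = 90 := rfl
    have hc : c.toNat = c.val.toNat := rfl
    have hb : c.toNat + 32 < 55296 := by omega
    have hv : (Char.ofNat (c.toNat + 32)).val.toNat = c.toNat + 32 := by
      simp [Char.ofNat, Nat.isValidChar, hb, Char.ofNatAux]
      omega
    omega
  · rfl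
  · rfl

theorem str_lower_idem (s : String) : PySem.Str.lower (PySem.Str.lower s) = PySem.Str.lower s := by
  apply String.toList_injective
  simp [PySem.Str.lower, PySem.Chars.lower, List.map_map, Function.comp_def, lowerChar_idem]

theorem isIn_newin_imp_new (url : String) :
    PySem.Str.isIn "/new-in/" url = true → PySem.Str.isIn "new" url = true := by
  intro h
  rw [PySem.Str.isIn_iff_infix] at h ⊢
  exact List.IsInfix.trans (by decide) h

-- A's per-element step is 'append [cat] at key pvLabel cat' whenever the "web_url" lookup succeeds
theorem stepA_eq (d : PySem.Dict String (List (List (String × String)))) (cat : List (String × String))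
    (hw : (PySem.Dict.mk cat).contains "web_url" = true) :
    (match (PySem.Dict.mk cat).get? "web_url" with
      | none => d
      | some wu =>
        let url := PySem.Str.lower wu
        if PySem.Str.isIn "/men/" url then
          d.insert "men" (d.getD "men" [] ++ [cat])
        else if PySem.Str.isIn "/women/" url then
          d.insert "women" (d.getD "women" [] ++ [cat])
        else if PySem.Str.isIn "/sale/" url then
          d.insert "sale" (d.getD "sale" [] ++ [cat])
        else if PySem.Str.isIn "/new-in/" url || PySem.Str.isIn "new" (PySem.Str.lower url) then
          d.insert "new_in" (d.getD "new_in" [] ++ [cat])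
        else if PySem.Str.isIn "/outlet/" url then
          d.insert "outlet" (d.getD "outlet" [] ++ [cat])
        else if PySem.Str.isIn "/marketplace/" url then
          d.insert "marketplace" (d.getD "marketplace" [] ++ [cat])
        else
          d.insert "other" (d.getD "other" [] ++ [cat])) =
    d.modify (pvLabel cat) [] (fun l => l ++ [cat]) := by
  unfold pvLabel
  cases hg : (PySem.Dict.mk cat).get? "web_url" with
  | none =>
    exfalso
    simp [PySem.Dict.contains, PySem.Dict.get?] at hw hg
    obtain ⟨x, hx⟩ := hw
    exact hg _ _ hx rfl
  | some wu =>
    simp only []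
    rw [str_lower_idem wu]
    have hnew : (PySem.Str.isIn "/new-in/" (PySem.Str.lower wu) || PySem.Str.isIn "new" (PySem.Str.lower wu))
        = PySem.Str.isIn "new" (PySem.Str.lower wu) := by
      cases hi : PySem.Str.isIn "/new-in/" (PySem.Str.lower wu) with
      | false => exact Bool.false_or _
      | true => rw [isIn_newin_imp_new _ hi]; rfl
    rw [hnew]
    simp only [pvRules, List.find?]
    split_ifs with h1 h2 h3 h4 h5 h6 <;> simp_all [PySem.Dict.modify]

-- ===== VERDICT =====
theorem categorize_by_section_spec : Claim_equal_categorize_by_section := by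
  intro categories _ hpre
  unfold Spec_categorize_by_section categorize_by_section categorize_by_section_alt
  simp only []
  -- A's fold as a modify-loop keyed by pvLabel
  have hfold :
      categories.foldl (fun sections cat =>
        match (PySem.Dict.mk cat).get? "web_url" with
        | none => sections
        | some wu =>
          let url := PySem.Str.lower wu
          if PySem.Str.isIn "/men/" url then
            sections.insert "men" (sections.getD "men" [] ++ [cat])
          else if PySem.Str.isIn "/women/" url then
            sections.insert "women" (sections.getD "women" [] ++ [cat])
          else if PySem.Str.isIn "/sale/" url then
            sections.insert "sale" (sections.getD "sale" [] ++ [cat])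
          else if PySem.Str.isIn "/new-in/" url || PySem.Str.isIn "new" (PySem.Str.lower url) then
            sections.insert "new_in" (sections.getD "new_in" [] ++ [cat])
          else if PySem.Str.isIn "/outlet/" url then
            sections.insert "outlet" (sections.getD "outlet" [] ++ [cat])
          else if PySem.Str.isIn "/marketplace/" url then
            sections.insert "marketplace" (sections.getD "marketplace" [] ++ [cat])
          else
            sections.insert "other" (sections.getD "other" [] ++ [cat])) PySem.Dict.empty
      = categories.foldl (fun d cat => d.modify (pvLabel cat) [] (fun l => l ++ [cat])) PySem.Dict.empty :=
    PySem.List.foldl_congr_mem _ _ _ _ (fun d cat hc => stepA_eq d cat (hpre cat hc))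
  rw [hfold]
  have hnd : (categories.foldl (fun d cat => d.modify (pvLabel cat) [] (fun l => l ++ [cat])) PySem.Dict.empty).keys.Nodup :=
    PySem.Dict.nodup_keys_foldl_modify_key categories pvLabel [] (fun _ cat l => l ++ [cat]) PySem.Dict.empty (by simp [PySem.Dict.empty, PySem.Dict.keys])
  rw [PySem.Dict.items_eq_map_keys _ hnd [], PySem.Dict.keys_foldl_modify_key]
  have hzip : categories.zip (categories.map pvLabel) = categories.map (fun c => (c, pvLabel c)) := by
    have := List.zip_map' (f := id) (g := pvLabel) (l := categories)
    simpa using this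
  have hgetD : ∀ k, (categories.foldl (fun d cat => d.modify (pvLabel cat) [] (fun l => l ++ [cat])) PySem.Dict.empty).getD k []
      = categories.filter (fun c => pvLabel c == k) := by
    intro k
    have hm : categories.foldl (fun d cat => d.modify (pvLabel cat) [] (fun l => l ++ [cat])) PySem.Dict.empty
        = (categories.map (fun c => (pvLabel c, c))).foldl (fun d p => d.modify p.1 [] (fun l => l ++ [p.2])) PySem.Dict.empty := by
      rw [List.foldl_map]
    rw [hm, PySem.Dict.getD_foldl_modify_append]
    simp [PySem.Dict.empty, PySem.Dict.getD, PySem.Dict.get?, List.filter_map, Function.comp_def]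
  have hkeys : PySem.Set.update (PySem.Dict.empty (κ := String) (ν := List (List (String × String)))).keys (categories.map pvLabel)
      = PySem.List.dedup (categories.map pvLabel) := by
    simp [PySem.Set.update_eq_append_filter, PySem.Dict.empty, PySem.Dict.keys, PySem.Set.contains]
  rw [hkeys]
  apply List.map_congr_left
  intro lab _
  rw [hgetD lab, hzip]
  simp [List.filter_map, Function.comp_def]
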